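-- pv_equiv track=rewrite | github.com/mariogiuseppegiudetti/isONspec | isONspec.py | stringhe_specifiche_old
-- ===== SOURCE A (Python) =====
-- def stringhe_specifiche_old(stringa1, stringa2):
--     # Inizializziamo una lista vuota per memorizzare le stringhe specifiche
--     stringhe_specifiche_list = []
--
--     # Iteriamo attraverso tutte le sottostringhe della prima stringa
--     for i in range(len(stringa1)):
--         for j in range(i + 1, len(stringa1) + 1):
--             sottostringa = stringa1[i:j]
--
--             # Verifichiamo se la sottostringa non è presente nella seconda stringa
--             if sottostringa not in stringa2:
--                 # Aggiungiamo la sottostringa alla lista delle stringhe specifiche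
--                 stringhe_specifiche_list.append(sottostringa)
--
--     return stringhe_specifiche_list, len(stringhe_specifiche_list)
-- ===== SOURCE B (Python) =====
-- def stringhe_specifiche_old(stringa1, stringa2):
--     n = len(stringa1)
--     out = []
--     for i in range(n):
--         # advance j past the longest prefix of stringa1[i:] occurring in stringa2;
--         # every longer extension is then automatically absent, emit them in bulk
--         j = i + 1
--         while j <= n and stringa1[i:j] in stringa2:
--             j += 1
--         for k in range(j, n + 1):
--             out.append(stringa1[i:k])
--     return out, len(out)
-- ===== Notes on version B (the rewrite author's own statement) =====
-- stated objective: alternative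
-- what changed: Instead of testing every substring of stringa1 for membership in stringa2, B finds for each start index the first length at which the substring is absent (a while loop) and then bulk-emits all longer extensions without any membership test, using that absence is monotone in substring length.
import Mathlib
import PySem

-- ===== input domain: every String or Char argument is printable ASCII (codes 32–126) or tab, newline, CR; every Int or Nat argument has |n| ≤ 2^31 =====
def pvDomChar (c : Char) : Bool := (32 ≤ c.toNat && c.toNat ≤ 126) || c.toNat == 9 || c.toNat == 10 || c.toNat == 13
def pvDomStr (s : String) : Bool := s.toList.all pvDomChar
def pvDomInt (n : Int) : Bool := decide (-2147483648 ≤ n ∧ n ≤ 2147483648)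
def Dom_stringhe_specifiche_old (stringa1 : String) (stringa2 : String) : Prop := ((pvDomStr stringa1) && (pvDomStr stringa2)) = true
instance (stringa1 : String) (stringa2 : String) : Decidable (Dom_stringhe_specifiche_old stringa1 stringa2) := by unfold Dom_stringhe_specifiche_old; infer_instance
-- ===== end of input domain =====

-- B changes the enumeration: instead of testing every substring against stringa2, it finds per
-- start index the first length at which the substring is absent and bulk-emits all longer
-- extensions (absence is monotone in length); objective: alternative algorithm, same output.

-- ===== PORT A =====
def stringhe_specifiche_old (stringa1 : String) (stringa2 : String) : List String × Int :=
  let stringhe_specifiche_list :=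
    (PySem.List.pyRange 0 (PySem.Str.len stringa1) 1).foldl (fun acc i =>
      (PySem.List.pyRange (i + 1) (PySem.Str.len stringa1 + 1) 1).foldl (fun acc2 j =>
        let sottostringa := PySem.Str.slice stringa1 (some i) (some j)
        if PySem.Str.isIn sottostringa stringa2 then acc2
        else acc2 ++ [sottostringa]) acc) []
  (stringhe_specifiche_list, (stringhe_specifiche_list.length : Int))

-- ===== PORT B =====
-- the 'while j <= n and stringa1[i:j] in stringa2: j += 1' loop of Source B
def pvBreak (stringa1 : String) (stringa2 : String) (i j n : Int) : Int :=
  if j ≤ n ∧ PySem.Str.isIn (PySem.Str.slice stringa1 (some i) (some j)) stringa2 = true then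
    pvBreak stringa1 stringa2 i (j + 1) n
  else j
termination_by (n + 1 - j).toNat
decreasing_by omega

def stringhe_specifiche_old_alt (stringa1 : String) (stringa2 : String) : List String × Int :=
  let n := PySem.Str.len stringa1
  let out := (PySem.List.pyRange 0 n 1).foldl (fun acc i =>
    let j := pvBreak stringa1 stringa2 i (i + 1) n
    acc ++ (PySem.List.pyRange j (n + 1) 1).map
      (fun k => PySem.Str.slice stringa1 (some i) (some k))) []
  (out, (out.length : Int))

-- ===== PRECONDITION & SPEC =====
def Spec_stringhe_specifiche_old (stringa1 : String) (stringa2 : String) (out : List String × Int) : Prop := out = stringhe_specifiche_old_alt stringa1 stringa2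
instance (stringa1 : String) (stringa2 : String) (out : List String × Int) : Decidable (Spec_stringhe_specifiche_old stringa1 stringa2 out) := by unfold Spec_stringhe_specifiche_old; infer_instance

-- ===== CLAIM (what is proved, stated in full; the proofs are below) =====
def Claim_equal_stringhe_specifiche_old : Prop := ∀ (stringa1 : String) (stringa2 : String), Dom_stringhe_specifiche_old stringa1 stringa2 → Spec_stringhe_specifiche_old stringa1 stringa2 (stringhe_specifiche_old stringa1 stringa2)

-- ===== LEMMAS AND PROOFS =====

-- Python's clamped slice bound is monotone for NONNEGATIVE bounds (negative ones wrap)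
theorem pv_clamp_mono (n : Nat) {a b : Int} (ha : 0 ≤ a) (h : a ≤ b) :
    PySem.List.clampIdx n a ≤ PySem.List.clampIdx n b := by
  unfold PySem.List.clampIdx
  rw [if_neg (not_lt.mpr ha), if_neg (not_lt.mpr (le_trans ha h))]
  omega

theorem pv_slice_prefix (xs : List Char) (i : Int) {j k : Int} (hj : 0 ≤ j) (h : j ≤ k) :
    PySem.List.slice xs (some i) (some j) <+: PySem.List.slice xs (some i) (some k) := by
  simp only [PySem.List.slice]
  exact List.take_prefix_take_left (by have := pv_clamp_mono xs.length hj h; omega)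

-- absence from stringa2 is monotone in the right slice bound (for nonnegative bounds)
theorem pv_check_mono (s1 s2 : String) (i : Int) {j k : Int} (hj : 0 ≤ j) (h : j ≤ k)
    (hf : PySem.Str.isIn (PySem.Str.slice s1 (some i) (some j)) s2 = false) :
    PySem.Str.isIn (PySem.Str.slice s1 (some i) (some k)) s2 = false := by
  rw [PySem.Str.isIn_eq, PySem.Chars.isIn_eq_false_iff, PySem.Str.toList_slice,
    PySem.Chars.slice_eq_listSlice] at *
  exact fun hinf => hf ((pv_slice_prefix s1.toList i hj h).isInfix.trans hinf)

theorem pv_check_eq (s1 s2 : String) (i k : Int) :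
    PySem.Str.isIn (PySem.Str.slice s1 (some i) (some k)) s2
      = PySem.Chars.isIn (PySem.List.slice s1.toList (some i) (some k)) s2.toList := by
  rw [PySem.Str.isIn_eq, PySem.Str.toList_slice, PySem.Chars.slice_eq_listSlice]

theorem pvBreak_ge (s1 s2 : String) (i j n : Int) : j ≤ pvBreak s1 s2 i j n := by
  fun_induction pvBreak <;> omega

theorem pvBreak_le (s1 s2 : String) (i j n : Int) (h : j ≤ n + 1) :
    pvBreak s1 s2 i j n ≤ n + 1 := by
  fun_induction pvBreak <;> omega

theorem pvBreak_true (s1 s2 : String) (i j n : Int) :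
    ∀ k, j ≤ k → k < pvBreak s1 s2 i j n →
      PySem.Str.isIn (PySem.Str.slice s1 (some i) (some k)) s2 = true := by
  fun_induction pvBreak with
  | case1 j h ih =>
    intro k hk1 hk2
    rcases eq_or_lt_of_le hk1 with rfl | hlt
    · exact h.2
    · exact ih k hlt hk2
  | case2 j h => intro k hk1 hk2; omega

theorem pvBreak_false (s1 s2 : String) (i j n : Int)
    (h : pvBreak s1 s2 i j n ≤ n) :
    PySem.Str.isIn (PySem.Str.slice s1 (some i) (some (pvBreak s1 s2 i j n))) s2 = false := by
  fun_induction pvBreak with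
  | case1 j hc ih => exact ih h
  | case2 j hc =>
    cases hb : PySem.Str.isIn (PySem.Str.slice s1 (some i) (some j)) s2 with
    | false => rfl
    | true => exact absurd ⟨h, hb⟩ hc

-- the inner loop of A equals the bulk emission of B, for each start i of the outer range
theorem pv_inner_eq (s1 s2 : String) (n : Int) (i : Int) (hi : 0 ≤ i) (hin : i < n)
    (acc : List String) :
    (PySem.List.pyRange (i + 1) (n + 1) 1).foldl (fun acc2 j =>
        if PySem.Str.isIn (PySem.Str.slice s1 (some i) (some j)) s2 then acc2
        else acc2 ++ [PySem.Str.slice s1 (some i) (some j)]) acc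
      = acc ++ (PySem.List.pyRange (pvBreak s1 s2 i (i + 1) n) (n + 1) 1).map
          (fun k => PySem.Str.slice s1 (some i) (some k)) := by
  have hstep : ∀ (acc2 : List String) (j : Int),
      (if PySem.Str.isIn (PySem.Str.slice s1 (some i) (some j)) s2 then acc2
        else acc2 ++ [PySem.Str.slice s1 (some i) (some j)])
      = (if (!PySem.Str.isIn (PySem.Str.slice s1 (some i) (some j)) s2) = true then
          acc2 ++ [PySem.Str.slice s1 (some i) (some j)] else acc2) := by
    intro acc2 j
    cases PySem.Str.isIn (PySem.Str.slice s1 (some i) (some j)) s2 <;> rfl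
  rw [PySem.List.foldl_congr_mem _ _ _ acc (fun acc2 j _ => hstep acc2 j),
    PySem.List.foldl_append_if]
  congr 1
  set j0 := pvBreak s1 s2 i (i + 1) n with hj0
  have hge : i + 1 ≤ j0 := pvBreak_ge s1 s2 i (i + 1) n
  have hle : j0 ≤ n + 1 := pvBreak_le s1 s2 i (i + 1) n (by omega)
  rw [PySem.List.pyRange_one_append (i + 1) j0 (n + 1) hge hle, List.filter_append]
  have h1 : (PySem.List.pyRange (i + 1) j0 1).filter
      (fun j => !PySem.Str.isIn (PySem.Str.slice s1 (some i) (some j)) s2) = [] := by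
    rw [List.filter_eq_nil_iff]
    intro k hk
    rw [PySem.List.mem_pyRange_one] at hk
    have ht := pvBreak_true s1 s2 i (i + 1) n k hk.1 hk.2
    rw [pv_check_eq] at ht
    simp [ht]
  have h2 : (PySem.List.pyRange j0 (n + 1) 1).filter
      (fun j => !PySem.Str.isIn (PySem.Str.slice s1 (some i) (some j)) s2)
      = PySem.List.pyRange j0 (n + 1) 1 := by
    rw [List.filter_eq_self]
    intro k hk
    rw [PySem.List.mem_pyRange_one] at hk
    have hj0n : j0 ≤ n := by omega
    have hf := pvBreak_false s1 s2 i (i + 1) n hj0n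
    have hm := pv_check_mono s1 s2 i (by omega : (0:Int) ≤ j0) hk.1 hf
    rw [pv_check_eq] at hm
    simp [hm]
  rw [h1, h2, List.nil_append]

-- ===== VERDICT (by name: the statement is the Claim_ definition above) =====
theorem stringhe_specifiche_old_spec : Claim_equal_stringhe_specifiche_old := by
  intro s1 s2 _
  unfold Spec_stringhe_specifiche_old stringhe_specifiche_old stringhe_specifiche_old_alt
  have hlst : (PySem.List.pyRange 0 (PySem.Str.len s1) 1).foldl (fun acc i =>
      (PySem.List.pyRange (i + 1) (PySem.Str.len s1 + 1) 1).foldl (fun acc2 j =>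
        let sottostringa := PySem.Str.slice s1 (some i) (some j)
        if PySem.Str.isIn sottostringa s2 then acc2
        else acc2 ++ [sottostringa]) acc) []
      = (PySem.List.pyRange 0 (PySem.Str.len s1) 1).foldl (fun acc i =>
        acc ++ (PySem.List.pyRange (pvBreak s1 s2 i (i + 1) (PySem.Str.len s1)) (PySem.Str.len s1 + 1) 1).map
          (fun k => PySem.Str.slice s1 (some i) (some k))) [] := by
    apply PySem.List.foldl_congr_mem
    intro acc i hi
    rw [PySem.List.mem_pyRange_one] at hi
    exact pv_inner_eq s1 s2 (PySem.Str.len s1) i hi.1 hi.2 acc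
  simp only [hlst]
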